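-- pv_equiv track=rewrite | github.com/MrBrantCode/unitest_baseline | mut_generate/mist_train_cf/cf_98214/solution.py | two_longest_with_digit_and_special
-- ===== SOURCE A (Python) =====
-- def two_longest_with_digit_and_special(lst):
--     result = []
--     longest = ""
--     second_longest = ""
--     for s in lst:
--         if len(s) > len(longest):
--             second_longest = longest
--             longest = s
--         elif len(s) > len(second_longest):
--             second_longest = s
--     for s in [longest, second_longest]:
--         if any(c.isdigit() for c in s) and any(c in '@!#$%^&*()' for c in s):
--             result.append(s)
--     return result
-- ===== SOURCE B (Python) =====
-- def two_longest_with_digit_and_special(lst):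
--     ranked = sorted(lst, key=len, reverse=True)
--     top = (ranked[:2] + ["", ""])[:2]
--     return [s for s in top
--             if any(c.isdigit() for c in s) and any(c in '@!#$%^&*()' for c in s)]
-- ===== Notes on version B (the rewrite author's own statement) =====
-- stated objective: simpler
-- what changed: Replaced the hand-rolled longest/second-longest tracking loop and the explicit append loop with a stable reverse sort by length, taking the first two slots (padded with "") and filtering them with a comprehension.
import Mathlib
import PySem

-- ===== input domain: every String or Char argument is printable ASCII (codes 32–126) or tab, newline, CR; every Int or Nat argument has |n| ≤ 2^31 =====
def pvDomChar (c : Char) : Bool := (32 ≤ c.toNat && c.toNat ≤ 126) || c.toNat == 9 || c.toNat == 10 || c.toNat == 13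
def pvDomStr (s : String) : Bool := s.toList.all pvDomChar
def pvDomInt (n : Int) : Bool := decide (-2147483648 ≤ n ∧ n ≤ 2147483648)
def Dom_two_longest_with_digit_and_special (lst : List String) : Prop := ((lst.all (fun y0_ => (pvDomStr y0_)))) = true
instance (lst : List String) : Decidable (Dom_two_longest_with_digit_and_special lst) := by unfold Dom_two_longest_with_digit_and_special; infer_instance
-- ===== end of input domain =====

-- B replaces A's manual longest/second-longest tracking loop by a stable reverse
-- sort on length, taking (and ""-padding) the first two slots, then filtering: simpler, not faster.

-- shared filter predicate: both Pythons contain the literal condition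
-- "any(c.isdigit() for c in s) and any(c in '@!#$%^&*()' for c in s)";
-- `c in '@!#$%^&*()'` is single-character substring membership, ported via PySem.Chars.isIn.
def pvWanted (s : String) : Bool :=
  (s.toList.any (fun c => PySem.Str.isdigit c)) &&
  (s.toList.any (fun c => PySem.Chars.isIn [c] "@!#$%^&*()".toList))

-- ===== PORT A =====
-- the body of A's first for-loop, on the state (longest, second_longest)
def pvStepA (acc : String × String) (s : String) : String × String :=
  if PySem.Str.len s > PySem.Str.len acc.1 then (s, acc.1)
  else if PySem.Str.len s > PySem.Str.len acc.2 then (acc.1, s)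
  else acc

def two_longest_with_digit_and_special (lst : List String) : List String :=
  let p := lst.foldl pvStepA ("", "")
  [p.1, p.2].foldl (fun result s => if pvWanted s then result ++ [s] else result) []

-- ===== PORT B =====
def two_longest_with_digit_and_special_alt (lst : List String) : List String :=
  let ranked := PySem.List.sorted lst (fun s => PySem.Str.len s) true
  let top := PySem.List.slice (PySem.List.slice ranked none (some 2) ++ ["", ""]) none (some 2)
  top.filter (fun s => pvWanted s)

-- ===== PRECONDITION & SPEC =====
def Spec_two_longest_with_digit_and_special (lst : List String) (out : List String) : Prop := out = two_longest_with_digit_and_special_alt lst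
instance (lst : List String) (out : List String) : Decidable (Spec_two_longest_with_digit_and_special lst out) := by unfold Spec_two_longest_with_digit_and_special; infer_instance

-- ===== CLAIM (what is proved, stated in full; the proofs are below) =====
def Claim_equal_two_longest_with_digit_and_special : Prop := ∀ (lst : List String), Dom_two_longest_with_digit_and_special lst → Spec_two_longest_with_digit_and_special lst (two_longest_with_digit_and_special lst)

-- ===== LEMMAS AND PROOFS =====

-- the first two elements of a list, ""-padded — what B keeps of the sorted list
def pvFirstTwo : List String → String × String
  | [] => ("", "")
  | [a] => (a, "")
  | a :: b :: _ => (a, b)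

-- inserting x into acc (reverse-sort insertion) changes the first two slots exactly as A's loop body does
theorem pvFirstTwo_insertBy (x : String) (acc : List String) :
    pvFirstTwo (PySem.List.insertBy (fun a b => decide (PySem.Str.len b < PySem.Str.len a)) x acc)
      = pvStepA (pvFirstTwo acc) x := by
  match acc with
  | [] =>
    simp only [PySem.List.insertBy, pvFirstTwo, pvStepA, PySem.Str.len_eq]
    split_ifs <;> simp_all
  | [c] =>
    simp only [PySem.List.insertBy, pvFirstTwo, pvStepA, PySem.Str.len_eq]
    split_ifs <;> simp_all <;> omega
  | c :: d :: rest =>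
    simp only [PySem.List.insertBy, pvFirstTwo, pvStepA, PySem.Str.len_eq]
    split_ifs <;> simp_all <;> omega

theorem pvFirstTwo_foldl (xs : List String) :
    ∀ acc : List String,
      pvFirstTwo (xs.foldl (fun acc x => PySem.List.insertBy (fun a b => decide (PySem.Str.len b < PySem.Str.len a)) x acc) acc)
        = xs.foldl pvStepA (pvFirstTwo acc) := by
  induction xs with
  | nil => intro acc; rfl
  | cons x xs ih =>
    intro acc
    simp only [List.foldl_cons, ih, pvFirstTwo_insertBy]

-- the padded two-slot list B builds is exactly [first, second] of the sorted list
theorem pvTop_eq (ranked : List String) :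
    PySem.List.slice (PySem.List.slice ranked none (some 2) ++ ["", ""]) none (some 2)
      = [(pvFirstTwo ranked).1, (pvFirstTwo ranked).2] := by
  have h2 : ∀ (ys : List String), PySem.List.slice ys none (some 2) = ys.take 2 :=
    fun ys => PySem.List.slice_to ys (by norm_num)
  rw [h2, h2]
  match ranked with
  | [] => rfl
  | [a] => rfl
  | a :: b :: t => rfl

theorem pvFilter_pair (a b : String) :
    [a, b].foldl (fun result s => if pvWanted s then result ++ [s] else result) []
      = [a, b].filter (fun s => pvWanted s) := by
  simp only [List.foldl_cons, List.foldl_nil, List.filter]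
  by_cases ha : pvWanted a <;> by_cases hb : pvWanted b <;> simp [ha, hb]

-- ===== VERDICT (by name: the statement is the Claim_ definition above) =====
theorem two_longest_with_digit_and_special_spec : Claim_equal_two_longest_with_digit_and_special := by
  intro lst _
  simp only [Spec_two_longest_with_digit_and_special, two_longest_with_digit_and_special,
    two_longest_with_digit_and_special_alt]
  rw [PySem.List.sorted_rev_eq_foldl_insertBy, pvTop_eq, pvFirstTwo_foldl]
  exact pvFilter_pair _ _
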